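-- pv_equiv track=rewrite | github.com/Akheelkappoor/lms-project | app/utils/tutor_matching.py | process_subject_query
-- ===== SOURCE A (Python) =====
-- from typing import List, Dict, Tuple, Optional
--
-- def process_subject_query(query: str) -> List[str]:
--     """Process subject search query and return variations"""
--     if not query:
--         return []
--
--     query = query.lower().strip()
--     variations = [query]
--
--     # Common subject aliases
--     subject_aliases = {
--         'math': ['mathematics', 'maths', 'arithmetic'],
--         'physics': ['phy', 'physical science'],
--         'chemistry': ['chem', 'chemical science'],
--         'biology': ['bio', 'life science'],
--         'english': ['eng', 'language', 'literature'],
--         'computer science': ['cs', 'computing', 'programming'],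
--         'social studies': ['social science', 'history', 'geography']
--     }
--
--     # Add aliases if query matches
--     for main_subject, aliases in subject_aliases.items():
--         if query in [main_subject] + aliases:
--             variations.extend([main_subject] + aliases)
--
--     return list(set(variations))
-- ===== SOURCE B (Python) =====
-- _SUBJECT_ALIASES = {
--     'math': ['mathematics', 'maths', 'arithmetic'],
--     'physics': ['phy', 'physical science'],
--     'chemistry': ['chem', 'chemical science'],
--     'biology': ['bio', 'life science'],
--     'english': ['eng', 'language', 'literature'],
--     'computer science': ['cs', 'computing', 'programming'],
--     'social studies': ['social science', 'history', 'geography'],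
-- }
--
-- # Flat reverse-lookup index: every term (main subject or alias) -> its full group.
-- _ALIAS_INDEX = {}
-- for _main, _aliases in _SUBJECT_ALIASES.items():
--     _group = [_main] + _aliases
--     for _term in _group:
--         _ALIAS_INDEX[_term] = _group
--
--
-- def process_subject_query(query: str) -> list:
--     """Process subject search query and return variations"""
--     if not query:
--         return []
--     query = query.lower().strip()
--     variations = [query]
--     group = _ALIAS_INDEX.get(query)
--     if group is not None:
--         variations.extend(group)
--     return list(set(variations))
-- ===== Notes on version B (the rewrite author's own statement) =====
-- stated objective: idiomatic
-- what changed: B precomputes once a flat reverse-lookup dict mapping every term (main subject or alias) to its full variation group, so the query is resolved by a single dict lookup instead of scanning every alias group and its member list.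
import Mathlib
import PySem

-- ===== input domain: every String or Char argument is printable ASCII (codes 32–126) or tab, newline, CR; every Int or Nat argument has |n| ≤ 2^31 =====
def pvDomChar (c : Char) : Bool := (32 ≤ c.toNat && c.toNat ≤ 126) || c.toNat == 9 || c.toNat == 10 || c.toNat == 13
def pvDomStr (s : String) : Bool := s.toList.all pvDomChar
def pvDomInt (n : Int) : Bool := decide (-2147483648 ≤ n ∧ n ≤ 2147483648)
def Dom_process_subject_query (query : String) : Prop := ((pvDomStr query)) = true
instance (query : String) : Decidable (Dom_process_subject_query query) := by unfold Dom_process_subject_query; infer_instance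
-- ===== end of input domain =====

-- B replaces A's per-call scan over every alias group with a one-time flat reverse-lookup
-- dict (term -> full group) and a single lookup; return values are equal (the final list is
-- built via set(), whose Python iteration order is not part of the claim — outputs compared as sets).

-- shared alias table (both Python versions carry the same literal table)
def pvSubjectAliases : List (String × List String) :=
  [("math", ["mathematics", "maths", "arithmetic"]),
   ("physics", ["phy", "physical science"]),
   ("chemistry", ["chem", "chemical science"]),
   ("biology", ["bio", "life science"]),
   ("english", ["eng", "language", "literature"]),
   ("computer science", ["cs", "computing", "programming"]),
   ("social studies", ["social science", "history", "geography"])]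

-- ===== PORT A =====
def process_subject_query (query : String) : List String :=
  if query = "" then []
  else
    let q := PySem.Str.strip (PySem.Str.lower query)
    let variations := [q]
    -- for main_subject, aliases in subject_aliases.items(): if query in [main]+aliases: variations.extend([main]+aliases)
    let variations := pvSubjectAliases.foldl
      (fun acc p => if (p.1 :: p.2).contains q then acc ++ (p.1 :: p.2) else acc) variations
    PySem.Set.ofList variations

-- ===== PORT B =====
-- flat reverse-lookup index built once: every term (main or alias) -> its full group
def pvAliasIndex : PySem.Dict String (List String) :=
  pvSubjectAliases.foldl
    (fun d p => (p.1 :: p.2).foldl (fun d t => PySem.Dict.insert d t (p.1 :: p.2)) d)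
    PySem.Dict.empty

def process_subject_query_alt (query : String) : List String :=
  if query = "" then []
  else
    let q := PySem.Str.strip (PySem.Str.lower query)
    let variations := [q]
    let variations := match PySem.Dict.get? pvAliasIndex q with
      | some g => variations ++ g
      | none => variations
    PySem.Set.ofList variations

-- ===== PRECONDITION & SPEC =====
def Spec_process_subject_query (query : String) (out : List String) : Prop := out = process_subject_query_alt query
instance (query : String) (out : List String) : Decidable (Spec_process_subject_query query out) := by unfold Spec_process_subject_query; infer_instance

-- ===== CLAIM (what is proved, stated in full; the proofs are below) =====
def Claim_equal_process_subject_query : Prop := ∀ (query : String), Dom_process_subject_query query → Spec_process_subject_query query (process_subject_query query)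

-- ===== LEMMAS AND PROOFS =====

-- the alias groups are pairwise disjoint, so A's scan appends exactly the group B's index returns
set_option maxRecDepth 8192 in
theorem pv_variations_eq (q : String) :
    pvSubjectAliases.foldl
      (fun acc p => if (p.1 :: p.2).contains q then acc ++ (p.1 :: p.2) else acc) [q]
    = (match PySem.Dict.get? pvAliasIndex q with
       | some g => [q] ++ g
       | none => [q]) := by
  by_cases h0 : q = "math"
  · subst h0; decide
  by_cases h1 : q = "mathematics"
  · subst h1; decide
  by_cases h2 : q = "maths"
  · subst h2; decide
  by_cases h3 : q = "arithmetic"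
  · subst h3; decide
  by_cases h4 : q = "physics"
  · subst h4; decide
  by_cases h5 : q = "phy"
  · subst h5; decide
  by_cases h6 : q = "physical science"
  · subst h6; decide
  by_cases h7 : q = "chemistry"
  · subst h7; decide
  by_cases h8 : q = "chem"
  · subst h8; decide
  by_cases h9 : q = "chemical science"
  · subst h9; decide
  by_cases h10 : q = "biology"
  · subst h10; decide
  by_cases h11 : q = "bio"
  · subst h11; decide
  by_cases h12 : q = "life science"
  · subst h12; decide
  by_cases h13 : q = "english"
  · subst h13; decide
  by_cases h14 : q = "eng"
  · subst h14; decide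
  by_cases h15 : q = "language"
  · subst h15; decide
  by_cases h16 : q = "literature"
  · subst h16; decide
  by_cases h17 : q = "computer science"
  · subst h17; decide
  by_cases h18 : q = "cs"
  · subst h18; decide
  by_cases h19 : q = "computing"
  · subst h19; decide
  by_cases h20 : q = "programming"
  · subst h20; decide
  by_cases h21 : q = "social studies"
  · subst h21; decide
  by_cases h22 : q = "social science"
  · subst h22; decide
  by_cases h23 : q = "history"
  · subst h23; decide
  by_cases h24 : q = "geography"
  · subst h24; decide
  have hIdx : pvAliasIndex = PySem.Dict.mk [("math", ["math", "mathematics", "maths", "arithmetic"]),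
      ("mathematics", ["math", "mathematics", "maths", "arithmetic"]),
      ("maths", ["math", "mathematics", "maths", "arithmetic"]),
      ("arithmetic", ["math", "mathematics", "maths", "arithmetic"]),
      ("physics", ["physics", "phy", "physical science"]),
      ("phy", ["physics", "phy", "physical science"]),
      ("physical science", ["physics", "phy", "physical science"]),
      ("chemistry", ["chemistry", "chem", "chemical science"]),
      ("chem", ["chemistry", "chem", "chemical science"]),
      ("chemical science", ["chemistry", "chem", "chemical science"]),
      ("biology", ["biology", "bio", "life science"]),
      ("bio", ["biology", "bio", "life science"]),
      ("life science", ["biology", "bio", "life science"]),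
      ("english", ["english", "eng", "language", "literature"]),
      ("eng", ["english", "eng", "language", "literature"]),
      ("language", ["english", "eng", "language", "literature"]),
      ("literature", ["english", "eng", "language", "literature"]),
      ("computer science", ["computer science", "cs", "computing", "programming"]),
      ("cs", ["computer science", "cs", "computing", "programming"]),
      ("computing", ["computer science", "cs", "computing", "programming"]),
      ("programming", ["computer science", "cs", "computing", "programming"]),
      ("social studies", ["social studies", "social science", "history", "geography"]),
      ("social science", ["social studies", "social science", "history", "geography"]),
      ("history", ["social studies", "social science", "history", "geography"]),
      ("geography", ["social studies", "social science", "history", "geography"])] := rfl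
  rw [hIdx]
  simp only [pvSubjectAliases, List.foldl, List.contains, PySem.Dict.get?_mk_cons]
  have h0' : ¬ "math" = q := fun e => h0 e.symm
  have h1' : ¬ "mathematics" = q := fun e => h1 e.symm
  have h2' : ¬ "maths" = q := fun e => h2 e.symm
  have h3' : ¬ "arithmetic" = q := fun e => h3 e.symm
  have h4' : ¬ "physics" = q := fun e => h4 e.symm
  have h5' : ¬ "phy" = q := fun e => h5 e.symm
  have h6' : ¬ "physical science" = q := fun e => h6 e.symm
  have h7' : ¬ "chemistry" = q := fun e => h7 e.symm
  have h8' : ¬ "chem" = q := fun e => h8 e.symm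
  have h9' : ¬ "chemical science" = q := fun e => h9 e.symm
  have h10' : ¬ "biology" = q := fun e => h10 e.symm
  have h11' : ¬ "bio" = q := fun e => h11 e.symm
  have h12' : ¬ "life science" = q := fun e => h12 e.symm
  have h13' : ¬ "english" = q := fun e => h13 e.symm
  have h14' : ¬ "eng" = q := fun e => h14 e.symm
  have h15' : ¬ "language" = q := fun e => h15 e.symm
  have h16' : ¬ "literature" = q := fun e => h16 e.symm
  have h17' : ¬ "computer science" = q := fun e => h17 e.symm
  have h18' : ¬ "cs" = q := fun e => h18 e.symm
  have h19' : ¬ "computing" = q := fun e => h19 e.symm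
  have h20' : ¬ "programming" = q := fun e => h20 e.symm
  have h21' : ¬ "social studies" = q := fun e => h21 e.symm
  have h22' : ¬ "social science" = q := fun e => h22 e.symm
  have h23' : ¬ "history" = q := fun e => h23 e.symm
  have h24' : ¬ "geography" = q := fun e => h24 e.symm
  simp [PySem.Dict.get?, List.mem_cons, h0, h1, h2, h3, h4, h5, h6, h7, h8, h9, h10, h11, h12, h13, h14, h15, h16, h17, h18, h19, h20, h21, h22, h23, h24, h0', h1', h2', h3', h4', h5', h6', h7', h8', h9', h10', h11', h12', h13', h14', h15', h16', h17', h18', h19', h20', h21', h22', h23', h24']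

-- ===== VERDICT (by name: the statement is the Claim_ definition above) =====
theorem process_subject_query_spec : Claim_equal_process_subject_query := by
  intro query _
  unfold Spec_process_subject_query process_subject_query process_subject_query_alt
  by_cases hq : query = ""
  · simp [hq]
  · simp only [hq, if_false]
    rw [pv_variations_eq]
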